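-- pv_equiv track=rewrite | github.com/lovartai/lovart-skill | scripts/sync_models.py | render_skill_sections
-- ===== SOURCE A (Python) =====
-- CATEGORY_ORDER = ["IMAGE", "VIDEO", "3D"]
--
-- def render_skill_sections(tools: list[dict], locale: dict) -> str:
--     """Three per-category sub-tables, no Premium column — matches the
--     pre-existing SKILL.md layout that AI agents consume."""
--     cat_map = locale["category"]
--     grouped = group_by_category(tools)
--     blocks: list[str] = []
--     for cat in CATEGORY_ORDER:
--         rows = [t for t in grouped if (t.get("category") or "") == cat]
--         if not rows:
--             continue
--         label = cat_map.get(cat, cat)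
--         lines = [
--             f"**{label}:**",
--             "",
--             "| Tool name | Display name |",
--             "|---|---|",
--         ]
--         for t in rows:
--             lines.append(f"| `{t.get('name','')}` | {t.get('display_name','')} |")
--         blocks.append("\n".join(lines))
--     return "\n\n".join(blocks)
--
-- def group_by_category(tools: list[dict]) -> list[dict]:
--     """Return tools grouped by CATEGORY_ORDER (IMAGE → VIDEO → 3D → other),
--     preserving the upstream order within each category.
--
--     queryAgentInfo returns tools in curated order (agent_tool_relation.id),
--     so within a category we keep whatever order the catalog hands us."""
--     def cat_idx(t: dict) -> int:
--         try:
--             return CATEGORY_ORDER.index(t.get("category") or "")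
--         except ValueError:
--             return len(CATEGORY_ORDER)
--
--     indexed = list(enumerate(tools))
--     indexed.sort(key=lambda pair: (cat_idx(pair[1]), pair[0]))
--     return [t for _, t in indexed]
-- ===== SOURCE B (Python) =====
-- CATEGORY_ORDER = ["IMAGE", "VIDEO", "3D"]
--
-- def render_skill_sections(tools: list[dict], locale: dict) -> str:
--     """Same tables as A, but one bucketing pass instead of sort-then-filter:
--     dict insertion order preserves the upstream within-category order."""
--     cat_map = locale["category"]
--     buckets: dict[str, list] = {}
--     for t in tools:
--         buckets.setdefault(t.get("category") or "", []).append(t)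
--     blocks: list[str] = []
--     for cat in CATEGORY_ORDER:
--         rows = buckets.get(cat, [])
--         if not rows:
--             continue
--         label = cat_map.get(cat, cat)
--         lines = [
--             f"**{label}:**",
--             "",
--             "| Tool name | Display name |",
--             "|---|---|",
--         ]
--         for t in rows:
--             lines.append(f"| `{t.get('name','')}` | {t.get('display_name','')} |")
--         blocks.append("\n".join(lines))
--     return "\n\n".join(blocks)
-- ===== Notes on version B (the rewrite author's own statement) =====
-- stated objective: faster
-- what changed: Replaces group_by_category's enumerate-and-stable-sort plus a rescan of the whole grouped list for each category by a single bucketing pass into an insertion-ordered dict with direct per-category lookups.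
import Mathlib
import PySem

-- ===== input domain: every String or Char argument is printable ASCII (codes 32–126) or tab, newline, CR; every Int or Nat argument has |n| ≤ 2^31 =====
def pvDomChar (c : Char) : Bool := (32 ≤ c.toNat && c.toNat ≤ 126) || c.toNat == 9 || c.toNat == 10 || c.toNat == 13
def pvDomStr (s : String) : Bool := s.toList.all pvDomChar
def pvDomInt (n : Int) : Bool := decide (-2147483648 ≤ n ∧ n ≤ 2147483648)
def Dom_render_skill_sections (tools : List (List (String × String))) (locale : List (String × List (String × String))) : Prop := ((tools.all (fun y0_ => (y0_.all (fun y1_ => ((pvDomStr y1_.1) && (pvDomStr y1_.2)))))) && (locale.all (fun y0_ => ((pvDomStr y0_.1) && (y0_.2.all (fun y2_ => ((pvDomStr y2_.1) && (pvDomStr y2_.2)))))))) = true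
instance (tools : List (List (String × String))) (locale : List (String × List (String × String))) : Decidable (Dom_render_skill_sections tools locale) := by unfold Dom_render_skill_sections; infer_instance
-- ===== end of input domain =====

-- B replaces A's enumerate-and-stable-sort grouping (plus a rescan of the whole grouped
-- list per category) by one bucketing pass into an insertion-ordered dict; same output.

-- ===== PORT A =====
def pvCATEGORY_ORDER : List String := ["IMAGE", "VIDEO", "3D"]

-- `t.get("category") or ""` (values are strings; "" is the only falsy string)
def pvOrEmpty (v : Option String) : String :=
  match v with
  | none => ""
  | some s => if s = "" then "" else s

def pvCat (t : List (String × String)) : String :=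
  pvOrEmpty ((PySem.Dict.ofList t).get? "category")

-- cat_idx: CATEGORY_ORDER.index(...) with ValueError -> len(CATEGORY_ORDER)
def pvCatIdx (t : List (String × String)) : Int :=
  match PySem.List.index? pvCATEGORY_ORDER (pvCat t) with
  | some i => (i : Int)
  | none => (pvCATEGORY_ORDER.length : Int)

def group_by_category (tools : List (List (String × String))) : List (List (String × String)) :=
  (PySem.List.sorted2 (PySem.List.enumerate tools 0)
      (fun p => pvCatIdx p.2) (fun p => p.1)).map (fun p => p.2)

-- f"| `{t.get('name','')}` | {t.get('display_name','')} |"  (identical line in A and B)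
def pvToolLine (t : List (String × String)) : String :=
  "| `" ++ (PySem.Dict.ofList t).getD "name" "" ++ "` | " ++
    (PySem.Dict.ofList t).getD "display_name" "" ++ " |"

-- the lines list + "\n".join (identical in A and B)
def pvBlock (catMap : PySem.Dict String String) (cat : String)
    (rows : List (List (String × String))) : String :=
  PySem.Str.join "\n"
    (["**" ++ catMap.getD cat cat ++ ":**", "", "| Tool name | Display name |", "|---|---|"]
      ++ rows.map pvToolLine)

def render_skill_sections (tools : List (List (String × String))) (locale : List (String × List (String × String))) : String :=
  let cat_map : PySem.Dict String String :=
    PySem.Dict.ofList (((PySem.Dict.ofList locale).get? "category").getD [])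
  let grouped := group_by_category tools
  let blocks := pvCATEGORY_ORDER.foldl (fun blocks cat =>
    let rows := grouped.filter (fun t => pvCat t == cat)
    if rows.isEmpty then blocks else blocks ++ [pvBlock cat_map cat rows]) []
  PySem.Str.join "\n\n" blocks

-- ===== PORT B =====
def render_skill_sections_alt (tools : List (List (String × String))) (locale : List (String × List (String × String))) : String :=
  let cat_map : PySem.Dict String String :=
    PySem.Dict.ofList (((PySem.Dict.ofList locale).get? "category").getD [])
  -- buckets.setdefault(t.get("category") or "", []).append(t)
  let buckets := tools.foldl
    (fun d t => d.modify (pvCat t) [] (fun l => l ++ [t]))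
    (PySem.Dict.empty : PySem.Dict String (List (List (String × String))))
  let blocks := pvCATEGORY_ORDER.foldl (fun blocks cat =>
    let rows := buckets.getD cat []
    if rows.isEmpty then blocks else blocks ++ [pvBlock cat_map cat rows]) []
  PySem.Str.join "\n\n" blocks

-- ===== PRECONDITION & SPEC =====
-- A (and B) raise KeyError on locale["category"] when the key is absent; only that is excluded.
def Pre_render_skill_sections (tools : List (List (String × String))) (locale : List (String × List (String × String))) : Prop :=
  (PySem.Dict.ofList locale).contains "category" = true
instance (tools : List (List (String × String))) (locale : List (String × List (String × String))) : Decidable (Pre_render_skill_sections tools locale) := by unfold Pre_render_skill_sections; infer_instance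

def pvWitness_render_skill_sections : (List (List (String × String))) × (List (String × List (String × String))) :=
  ([[("category", "IMAGE"), ("name", "flux"), ("display_name", "Flux")]],
   [("category", [("IMAGE", "Image")])])

def Spec_render_skill_sections (tools : List (List (String × String))) (locale : List (String × List (String × String))) (out : String) : Prop := out = render_skill_sections_alt tools locale
instance (tools : List (List (String × String))) (locale : List (String × List (String × String))) (out : String) : Decidable (Spec_render_skill_sections tools locale out) := by unfold Spec_render_skill_sections; infer_instance

-- ===== CLAIM (what is proved, stated in full; the proofs are below) =====
def Claim_equal_render_skill_sections : Prop := ∀ (tools : List (List (String × String))) (locale : List (String × List (String × String))), Dom_render_skill_sections tools locale → Pre_render_skill_sections tools locale → Spec_render_skill_sections tools locale (render_skill_sections tools locale)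

-- ===== LEMMAS AND PROOFS =====

-- the strict comparison sorted2 sorts by (reverse = false)
def pvLt {α : Type} (f g : α → Int) (a b : α) : Bool :=
  decide (f a < f b) || (!decide (f b < f a) && decide (g a < g b))

theorem pvLt_true_iff {α : Type} (f g : α → Int) (a b : α) :
    pvLt f g a b = true ↔ (f a < f b ∨ (¬ f b < f a ∧ g a < g b)) := by
  simp [pvLt]

theorem pvLt_false_iff {α : Type} (f g : α → Int) (a b : α) :
    pvLt f g a b = false ↔ (¬ f a < f b ∧ (f b < f a ∨ ¬ g a < g b)) := by
  rw [← Bool.not_eq_true, pvLt_true_iff]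
  tauto

theorem pvSorted2_eq_foldl {α : Type} (xs : List α) (f g : α → Int) :
    PySem.List.sorted2 xs f g = xs.foldl (fun acc x => PySem.List.insertBy (pvLt f g) x acc) [] := rfl

theorem pvInsertBy_perm {α : Type} (b : α → α → Bool) (x : α) :
    ∀ ys : List α, (PySem.List.insertBy b x ys).Perm (x :: ys) := by
  intro ys
  induction ys with
  | nil => simp [PySem.List.insertBy]
  | cons y ys ih =>
    simp only [PySem.List.insertBy]
    split
    · exact List.Perm.refl _
    · exact (ih.cons y).trans (List.Perm.swap x y ys)

theorem pvMem_insertBy {α : Type} (b : α → α → Bool) (x z : α) (ys : List α)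
    (h : z ∈ PySem.List.insertBy b x ys) : z = x ∨ z ∈ ys := by
  have := (pvInsertBy_perm b x ys).mem_iff.mp h
  simpa using this

theorem pvPairwise_insertBy {α : Type} (f g : α → Int) (x : α) (ys : List α)
    (h : ys.Pairwise (fun a b => pvLt f g b a = false)) :
    (PySem.List.insertBy (pvLt f g) x ys).Pairwise (fun a b => pvLt f g b a = false) := by
  induction ys with
  | nil => simp [PySem.List.insertBy]
  | cons y ys ih =>
    simp only [PySem.List.insertBy]
    rcases List.pairwise_cons.mp h with ⟨hy, hys⟩
    split
    · rename_i hxy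
      rw [pvLt_true_iff] at hxy
      refine List.pairwise_cons.mpr ⟨?_, h⟩
      intro z hz
      rcases List.mem_cons.mp hz with hz | hz
      · subst hz
        rw [pvLt_false_iff]
        omega
      · have hzy := hy z hz
        rw [pvLt_false_iff] at hzy ⊢
        omega
    · rename_i hxy
      rw [Bool.not_eq_true] at hxy
      refine List.pairwise_cons.mpr ⟨?_, ih hys⟩
      intro z hz
      rcases pvMem_insertBy _ _ _ _ hz with hz | hz
      · subst hz; exact hxy
      · exact hy z hz

theorem pvSorted2_pairwise {α : Type} (f g : α → Int) (xs : List α) :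
    (PySem.List.sorted2 xs f g).Pairwise (fun a b => pvLt f g b a = false) := by
  rw [pvSorted2_eq_foldl]
  suffices h : ∀ acc : List α, acc.Pairwise (fun a b => pvLt f g b a = false) →
      (xs.foldl (fun acc x => PySem.List.insertBy (pvLt f g) x acc) acc).Pairwise
        (fun a b => pvLt f g b a = false) by
    exact h [] (by simp)
  induction xs with
  | nil => intro acc hacc; simpa using hacc
  | cons x xs ih =>
    intro acc hacc
    exact ih _ (pvPairwise_insertBy f g x acc hacc)

-- a strictly-ordered list is the unique such list among its permutations
theorem pvStrictSortedUnique {α : Type} (lt : α → α → Bool)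
    (hasym : ∀ a b, lt a b = true → lt b a = false) :
    ∀ ys zs : List α, ys.Perm zs → ys.Pairwise (fun a b => lt a b = true) →
      zs.Pairwise (fun a b => lt a b = true) → ys = zs := by
  intro ys
  induction ys with
  | nil => intro zs hp _ _; simpa using hp.nil_eq
  | cons y ys ih =>
    intro zs hp hy hz
    cases zs with
    | nil => exact absurd hp.symm.nil_eq (by simp)
    | cons z zs =>
      rcases List.pairwise_cons.mp hy with ⟨hy1, hy2⟩
      rcases List.pairwise_cons.mp hz with ⟨hz1, hz2⟩
      by_cases hzy : z = y
      · subst hzy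
        rw [ih zs hp.cons_inv hy2 hz2]
      · have hzin : z ∈ y :: ys := hp.symm.subset List.mem_cons_self
        have hzys : z ∈ ys := by
          rcases List.mem_cons.mp hzin with h | h
          · exact absurd h hzy
          · exact h
        have hyin : y ∈ z :: zs := hp.subset List.mem_cons_self
        have hyzs : y ∈ zs := by
          rcases List.mem_cons.mp hyin with h | h
          · exact absurd h.symm hzy
          · exact h
        have h1 := hasym _ _ (hy1 z hzys)
        have h2 := hz1 y hyzs
        rw [h1] at h2
        exact absurd h2 (by simp)

-- ---- the per-category index: case analysis on pvCat ----
theorem pvCatIdx_cases (t : List (String × String)) :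
    (pvCat t = "IMAGE" ∧ pvCatIdx t = 0) ∨ (pvCat t = "VIDEO" ∧ pvCatIdx t = 1) ∨
    (pvCat t = "3D" ∧ pvCatIdx t = 2) ∨
    (pvCat t ≠ "IMAGE" ∧ pvCat t ≠ "VIDEO" ∧ pvCat t ≠ "3D" ∧ pvCatIdx t = 3) := by
  unfold pvCatIdx pvCATEGORY_ORDER
  by_cases h1 : pvCat t = "IMAGE"
  · left; refine ⟨h1, ?_⟩; rw [h1]; rfl
  by_cases h2 : pvCat t = "VIDEO"
  · right; left; refine ⟨h2, ?_⟩; rw [h2]; rfl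
  by_cases h3 : pvCat t = "3D"
  · right; right; left; refine ⟨h3, ?_⟩; rw [h3]; rfl
  · right; right; right
    refine ⟨h1, h2, h3, ?_⟩
    have hnone : PySem.List.index? ["IMAGE", "VIDEO", "3D"] (pvCat t) = none := by
      rw [PySem.List.index?_eq_none_iff]
      simp only [List.mem_cons, List.not_mem_nil, or_false]
      intro h; rcases h with h | h | h
      · exact h1 h
      · exact h2 h
      · exact h3 h
    rw [hnone]
    rfl

theorem pvCatIdx_bound (t : List (String × String)) :
    pvCatIdx t = 0 ∨ pvCatIdx t = 1 ∨ pvCatIdx t = 2 ∨ pvCatIdx t = 3 := by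
  rcases pvCatIdx_cases t with ⟨_, h⟩ | ⟨_, h⟩ | ⟨_, h⟩ | ⟨_, _, _, h⟩ <;> simp [h]

-- the three concrete predicate equalities
theorem pvPred_eq (t : List (String × String)) (cat : String) (m : Int)
    (hcm : (cat = "IMAGE" ∧ m = 0) ∨ (cat = "VIDEO" ∧ m = 1) ∨ (cat = "3D" ∧ m = 2)) :
    (pvCat t == cat) = (pvCatIdx t == m) := by
  have key : (pvCat t = cat) ↔ (pvCatIdx t = m) := by
    rcases hcm with ⟨hcat, hm⟩ | ⟨hcat, hm⟩ | ⟨hcat, hm⟩ <;> subst hcat <;> subst hm <;>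
      constructor <;> intro h <;>
      rcases pvCatIdx_cases t with ⟨hc, hi⟩ | ⟨hc, hi⟩ | ⟨hc, hi⟩ | ⟨hc1, hc2, hc3, hi⟩ <;>
      simp_all
  by_cases h : pvCat t = cat
  · simp [h, key.mp h]
  · have h2 : ¬ pvCatIdx t = m := fun hm => h (key.mpr hm)
    simp [h, h2]

-- ---- the four-way partition of the enumerated list ----
def pvF (xs : List (Int × List (String × String))) (m : Int) : List (Int × List (String × String)) :=
  xs.filter (fun p => pvCatIdx p.2 == m)

theorem pvF_cons_eq (x : Int × List (String × String)) (xs : List (Int × List (String × String)))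
    (m : Int) (h : pvCatIdx x.2 = m) : pvF (x :: xs) m = x :: pvF xs m := by
  simp [pvF, h]

theorem pvF_cons_ne (x : Int × List (String × String)) (xs : List (Int × List (String × String)))
    (m : Int) (h : pvCatIdx x.2 ≠ m) : pvF (x :: xs) m = pvF xs m := by
  simp [pvF, h]

theorem pvPartition_perm (xs : List (Int × List (String × String))) :
    xs.Perm (pvF xs 0 ++ pvF xs 1 ++ pvF xs 2 ++ pvF xs 3) := by
  induction xs with
  | nil => simp [pvF]
  | cons x xs ih =>
    rcases pvCatIdx_bound x.2 with h | h | h | h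
    · rw [pvF_cons_eq x xs 0 h, pvF_cons_ne x xs 1 (by omega),
        pvF_cons_ne x xs 2 (by omega), pvF_cons_ne x xs 3 (by omega)]
      simpa using ih.cons x
    · rw [pvF_cons_ne x xs 0 (by omega), pvF_cons_eq x xs 1 h,
        pvF_cons_ne x xs 2 (by omega), pvF_cons_ne x xs 3 (by omega)]
      refine (ih.cons x).trans ?_
      simpa [List.append_assoc] using
        (List.perm_middle (a := x) (l₁ := pvF xs 0)
          (l₂ := pvF xs 1 ++ pvF xs 2 ++ pvF xs 3)).symm
    · rw [pvF_cons_ne x xs 0 (by omega), pvF_cons_ne x xs 1 (by omega),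
        pvF_cons_eq x xs 2 h, pvF_cons_ne x xs 3 (by omega)]
      refine (ih.cons x).trans ?_
      simpa [List.append_assoc] using
        (List.perm_middle (a := x) (l₁ := pvF xs 0 ++ pvF xs 1)
          (l₂ := pvF xs 2 ++ pvF xs 3)).symm
    · rw [pvF_cons_ne x xs 0 (by omega), pvF_cons_ne x xs 1 (by omega),
        pvF_cons_ne x xs 2 (by omega), pvF_cons_eq x xs 3 h]
      refine (ih.cons x).trans ?_
      simpa [List.append_assoc] using
        (List.perm_middle (a := x) (l₁ := pvF xs 0 ++ pvF xs 1 ++ pvF xs 2)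
          (l₂ := pvF xs 3)).symm

theorem pvMem_F {xs : List (Int × List (String × String))} {m : Int} {p}
    (h : p ∈ pvF xs m) : pvCatIdx p.2 = m := by
  have := List.of_mem_filter h
  simpa using this

-- the partition list is strictly sorted for pvLt
theorem pvPartition_pairwise (tools : List (List (String × String))) :
    (pvF (PySem.List.enumerate tools 0) 0 ++ pvF (PySem.List.enumerate tools 0) 1 ++
      pvF (PySem.List.enumerate tools 0) 2 ++ pvF (PySem.List.enumerate tools 0) 3).Pairwise
      (fun a b => pvLt (fun p => pvCatIdx p.2) (fun p => p.1) a b = true) := by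
  have hx : (PySem.List.enumerate tools 0).Pairwise (fun p q => p.1 < q.1) :=
    PySem.List.pairwise_lt_enumerate tools 0
  have hwithin : ∀ m : Int, (pvF (PySem.List.enumerate tools 0) m).Pairwise
      (fun a b => pvLt (fun p => pvCatIdx p.2) (fun p => p.1) a b = true) := by
    intro m
    have h1 : (pvF (PySem.List.enumerate tools 0) m).Pairwise (fun p q => p.1 < q.1) :=
      hx.filter _
    refine h1.imp_of_mem ?_
    intro a b ha hb hlt
    have hma := pvMem_F ha
    have hmb := pvMem_F hb
    rw [pvLt_true_iff]
    omega
  have hacross : ∀ m k : Int, m < k → ∀ a ∈ pvF (PySem.List.enumerate tools 0) m,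
      ∀ b ∈ pvF (PySem.List.enumerate tools 0) k,
      pvLt (fun p => pvCatIdx p.2) (fun p => p.1) a b = true := by
    intro m k hmk a ha b hb
    have hma := pvMem_F ha
    have hmb := pvMem_F hb
    rw [pvLt_true_iff]
    omega
  rw [List.pairwise_append, List.pairwise_append, List.pairwise_append]
  refine ⟨⟨⟨hwithin 0, hwithin 1, ?_⟩, hwithin 2, ?_⟩, hwithin 3, ?_⟩
  · exact fun a ha b hb => hacross 0 1 (by norm_num) a ha b hb
  · intro a ha b hb
    rcases List.mem_append.mp ha with ha | ha
    · exact hacross 0 2 (by norm_num) a ha b hb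
    · exact hacross 1 2 (by norm_num) a ha b hb
  · intro a ha b hb
    rcases List.mem_append.mp ha with ha' | ha'
    · rcases List.mem_append.mp ha' with ha'' | ha''
      · exact hacross 0 3 (by norm_num) a ha'' b hb
      · exact hacross 1 3 (by norm_num) a ha'' b hb
    · exact hacross 2 3 (by norm_num) a ha' b hb

-- sorted2's output is strictly sorted too (first components of enumerate are distinct)
theorem pvSorted_pairwise_strict (tools : List (List (String × String))) :
    (PySem.List.sorted2 (PySem.List.enumerate tools 0)
      (fun p => pvCatIdx p.2) (fun p => p.1)).Pairwise
      (fun a b => pvLt (fun p => pvCatIdx p.2) (fun p => p.1) a b = true) := by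
  have hperm : (PySem.List.sorted2 (PySem.List.enumerate tools 0)
      (fun p => pvCatIdx p.2) (fun p => p.1)).Perm (PySem.List.enumerate tools 0) :=
    PySem.List.sorted2_perm _ _ _ _
  have hle := pvSorted2_pairwise (fun p => pvCatIdx p.2) (fun p => p.1)
    (PySem.List.enumerate tools 0)
  have hne : (PySem.List.sorted2 (PySem.List.enumerate tools 0)
      (fun p => pvCatIdx p.2) (fun p => p.1)).Pairwise (fun p q => p.1 ≠ q.1) := by
    have hx : (PySem.List.enumerate tools 0).Pairwise
        (fun p q : Int × List (String × String) => p.1 ≠ q.1) :=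
      (PySem.List.pairwise_lt_enumerate tools 0).imp (fun h => by omega)
    exact (List.Perm.pairwise_iff
      (R := fun p q : Int × List (String × String) => p.1 ≠ q.1)
      (fun {_ _} h => Ne.symm h) hperm).mpr hx
  refine (hle.and hne).imp ?_
  rintro a b ⟨h1, h2⟩
  rw [pvLt_false_iff] at h1
  rw [pvLt_true_iff]
  omega

-- the characterisation of A's grouping
theorem pvSorted2_eq_partition (tools : List (List (String × String))) :
    PySem.List.sorted2 (PySem.List.enumerate tools 0)
      (fun p => pvCatIdx p.2) (fun p => p.1) =
    pvF (PySem.List.enumerate tools 0) 0 ++ pvF (PySem.List.enumerate tools 0) 1 ++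
      pvF (PySem.List.enumerate tools 0) 2 ++ pvF (PySem.List.enumerate tools 0) 3 := by
  have hasym : ∀ a b : Int × List (String × String),
      pvLt (fun p => pvCatIdx p.2) (fun p => p.1) a b = true →
      pvLt (fun p => pvCatIdx p.2) (fun p => p.1) b a = false := by
    intro a b h
    rw [pvLt_true_iff] at h
    rw [pvLt_false_iff]
    omega
  refine pvStrictSortedUnique _ hasym _ _ ?_ (pvSorted_pairwise_strict tools)
    (pvPartition_pairwise tools)
  exact (PySem.List.sorted2_perm _ _ _ _).trans (pvPartition_perm _)

theorem pvMap_snd_filter {α β : Type} (xs : List (α × β)) (pr : α × β → Bool) (p : β → Bool)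
    (hpr : ∀ q, pr q = p q.2) :
    (xs.filter pr).map (fun q => q.2) = (xs.map (fun q => q.2)).filter p := by
  induction xs with
  | nil => simp
  | cons x xs ih =>
    simp only [List.filter_cons, List.map_cons, hpr]
    by_cases h : p x.2 <;> simp [h, ih]

theorem pvMap_snd_F (tools : List (List (String × String))) (m : Int) :
    (pvF (PySem.List.enumerate tools 0) m).map (fun p => p.2) =
      tools.filter (fun t => pvCatIdx t == m) := by
  unfold pvF
  rw [pvMap_snd_filter _ _ (fun t => pvCatIdx t == m) (fun _ => rfl),
    PySem.List.map_snd_enumerate]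

-- A's per-category rescan of the grouped list is a plain filter of the input
theorem pvRows_A (tools : List (List (String × String))) (cat : String) (m : Int)
    (hcm : (cat = "IMAGE" ∧ m = 0) ∨ (cat = "VIDEO" ∧ m = 1) ∨ (cat = "3D" ∧ m = 2)) :
    (group_by_category tools).filter (fun t => pvCat t == cat) =
      tools.filter (fun t => pvCat t == cat) := by
  unfold group_by_category
  rw [pvSorted2_eq_partition]
  simp only [List.map_append, List.filter_append, pvMap_snd_F]
  have hpred : ∀ t, (pvCat t == cat) = (pvCatIdx t == m) := fun t => pvPred_eq t cat m hcm
  have hkeep : (tools.filter (fun t => pvCatIdx t == m)).filter (fun t => pvCat t == cat) =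
      tools.filter (fun t => pvCat t == cat) := by
    simp only [hpred, List.filter_filter, Bool.and_self]
  have hdrop : ∀ k : Int, k ≠ m →
      (tools.filter (fun t => pvCatIdx t == k)).filter (fun t => pvCat t == cat) = [] := by
    intro k hk
    rw [List.filter_eq_nil_iff]
    intro t ht
    have h1 : pvCatIdx t = k := by simpa using List.of_mem_filter ht
    simp only [hpred, beq_iff_eq]
    omega
  have hm : m = 0 ∨ m = 1 ∨ m = 2 := by
    rcases hcm with ⟨_, h⟩ | ⟨_, h⟩ | ⟨_, h⟩ <;> omega
  rcases hm with h | h | h <;> subst h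
  · simp [hkeep, hdrop 1 (by norm_num), hdrop 2 (by norm_num), hdrop 3 (by norm_num)]
  · simp [hkeep, hdrop 0 (by norm_num), hdrop 2 (by norm_num), hdrop 3 (by norm_num)]
  · simp [hkeep, hdrop 0 (by norm_num), hdrop 1 (by norm_num), hdrop 3 (by norm_num)]

-- B's bucket lookup is the same filter
theorem pvRows_B (tools : List (List (String × String))) (cat : String) :
    (tools.foldl (fun d t => d.modify (pvCat t) [] (fun l => l ++ [t]))
      (PySem.Dict.empty : PySem.Dict String (List (List (String × String))))).getD cat [] =
      tools.filter (fun t => pvCat t == cat) := by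
  have h : tools.foldl (fun d t => d.modify (pvCat t) [] (fun l => l ++ [t]))
      (PySem.Dict.empty : PySem.Dict String (List (List (String × String)))) =
      (tools.map (fun t => (pvCat t, t))).foldl
        (fun d p => d.modify p.1 [] (fun l => l ++ [p.2])) PySem.Dict.empty := by
    rw [List.foldl_map]
  rw [h, PySem.Dict.getD_foldl_modify_append]
  simp [List.filter_map, Function.comp_def, List.map_map]

-- ===== VERDICT (by name: the statement is the Claim_ definition above) =====
theorem render_skill_sections_spec : Claim_equal_render_skill_sections := by
  intro tools locale _ _
  show render_skill_sections tools locale = render_skill_sections_alt tools locale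
  unfold render_skill_sections render_skill_sections_alt
  simp only [pvCATEGORY_ORDER, List.foldl_cons, List.foldl_nil]
  rw [pvRows_A tools "IMAGE" 0 (Or.inl ⟨rfl, rfl⟩),
    pvRows_A tools "VIDEO" 1 (Or.inr (Or.inl ⟨rfl, rfl⟩)),
    pvRows_A tools "3D" 2 (Or.inr (Or.inr ⟨rfl, rfl⟩)),
    pvRows_B tools "IMAGE", pvRows_B tools "VIDEO", pvRows_B tools "3D"]
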